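-- pv_equiv track=rewrite | github.com/nemanja-stankovic/homeworks | nedelja 3/dz_05/dz_05_zad_1.py | boja_po_tipu
-- ===== SOURCE A (Python) =====
-- def boja_po_tipu(lista_podataka: list) -> dict:
--     automobili=[]
--     automobili_po_bojama={}
--     po_bojama={}
--     boje=[]
--     for i in range(1,len(lista_podataka)):
--         boje.append(lista_podataka[i][1])
--         automobili.append(lista_podataka[i][2])
--     boja=[]
--     count = 0
--     boja = []
--     for i in range(len(automobili)):
--         boja = []
--         for j in range(len(automobili)):
--             if automobili[i]==automobili[j]:
--                 boja.append(boje[j])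
--             automobili_po_bojama.update({automobili[i]:boja})
--     for key in automobili_po_bojama:
--         lista_boja=automobili_po_bojama.get(key)
--         recnik_boja={}
--         for i in range(len(lista_boja)):
--             count_boja=0
--             for j in range(len(lista_boja)):
--                 if lista_boja[i]==lista_boja[j]:
--                     count_boja+=1
--             recnik_boja.update({lista_boja[i]:count_boja})
--         automobili_po_bojama.update({key:recnik_boja})
--     boja_po_tipu={"boja_po_tipu":automobili_po_bojama}
--     return boja_po_tipu
-- ===== SOURCE B (Python) =====
-- def boja_po_tipu(lista_podataka: list) -> dict:
--     # One flat pass: type -> (color -> count), first-appearance order for both levels.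
--     rezultat = {}
--     for red in lista_podataka[1:]:
--         boja, tip = red[1], red[2]
--         unutra = rezultat.get(tip, {})
--         unutra[boja] = unutra.get(boja, 0) + 1
--         rezultat[tip] = unutra
--     return {"boja_po_tipu": rezultat}
-- ===== Notes on version B (the rewrite author's own statement) =====
-- stated objective: faster
-- what changed: Replaces A's two quadratic phases (an O(n^2) nested rescan grouping colors per type, then an O(m^2) rescan counting each color) by one linear pass that accumulates type->color->count dicts directly.
import Mathlib
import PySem

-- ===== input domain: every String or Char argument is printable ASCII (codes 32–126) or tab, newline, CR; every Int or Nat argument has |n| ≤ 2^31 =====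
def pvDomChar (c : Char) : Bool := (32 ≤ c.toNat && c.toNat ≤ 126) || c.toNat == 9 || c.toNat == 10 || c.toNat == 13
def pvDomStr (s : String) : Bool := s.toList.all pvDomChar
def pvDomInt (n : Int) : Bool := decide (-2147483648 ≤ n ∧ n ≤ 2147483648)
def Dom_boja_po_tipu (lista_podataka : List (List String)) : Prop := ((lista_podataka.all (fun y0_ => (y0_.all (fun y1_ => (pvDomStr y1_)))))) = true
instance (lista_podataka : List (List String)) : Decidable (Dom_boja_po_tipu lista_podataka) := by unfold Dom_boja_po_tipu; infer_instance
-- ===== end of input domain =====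

-- B replaces A's two quadratic rescan phases by one linear accumulating pass (return value only; neither version mutates its argument).

-- ===== PORT A =====
-- A's four loops, phase by phase.  Python's automobili_po_bojama holds lists during phase 2 and
-- dicts after phase 3; values are overwritten in place key by key in iteration order, so phase 3
-- is ported as building a second dict by inserting the distinct keys in that same order, reading
-- each (not yet overwritten) list value from the phase-2 dict.  Dead variables (po_bojama, count,
-- the boja resets) are dropped.

-- phase 1: for i in range(1, len(lista_podataka)): boje.append(row[1]); automobili.append(row[2])
def pvA_phase1 (lista_podataka : List (List String)) : List String × List String :=
  (PySem.List.pyRange 1 (PySem.List.len lista_podataka)).foldl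
    (fun (st : List String × List String) i =>
      (st.1 ++ [PySem.List.pyGetD (PySem.List.pyGetD lista_podataka i []) 1 ""],
       st.2 ++ [PySem.List.pyGetD (PySem.List.pyGetD lista_podataka i []) 2 ""])) ([], [])

-- phase 2: the nested i/j loops grouping colors per type (the dict is updated on every j)
def pvA_grouping (boje automobili : List String) : PySem.Dict String (List String) :=
  (PySem.List.pyRange 0 (PySem.List.len automobili)).foldl
    (fun d i =>
      let ti := PySem.List.pyGetD automobili i ""
      ((PySem.List.pyRange 0 (PySem.List.len automobili)).foldl
        (fun (st : List String × PySem.Dict String (List String)) j =>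
          let boja := if ti == PySem.List.pyGetD automobili j "" then st.1 ++ [PySem.List.pyGetD boje j ""] else st.1
          (boja, st.2.insert ti boja)) ([], d)).2)
    PySem.Dict.empty

-- phase 3 body: recnik_boja built by the nested i/j counting loops over lista_boja
def pvA_recnik (lista_boja : List String) : PySem.Dict String Int :=
  (PySem.List.pyRange 0 (PySem.List.len lista_boja)).foldl
    (fun r i =>
      let ci := PySem.List.pyGetD lista_boja i ""
      let count_boja : Int :=
        (PySem.List.pyRange 0 (PySem.List.len lista_boja)).foldl
          (fun c j => if ci == PySem.List.pyGetD lista_boja j "" then c + 1 else c) 0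
      r.insert ci count_boja) PySem.Dict.empty

-- phase 3: for key in automobili_po_bojama: overwrite its value with recnik_boja
def pvA_counting (apb : PySem.Dict String (List String)) : PySem.Dict String (PySem.Dict String Int) :=
  apb.keys.foldl
    (fun acc key => acc.insert key (pvA_recnik (apb.getD key []))) PySem.Dict.empty

def boja_po_tipu (lista_podataka : List (List String)) : List (String × List (String × List (String × Int))) :=
  [("boja_po_tipu",
    (pvA_counting (pvA_grouping (pvA_phase1 lista_podataka).1 (pvA_phase1 lista_podataka).2)).items.map
      (fun q => (q.1, q.2.items)))]

-- ===== PORT B =====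
def boja_po_tipu_alt (lista_podataka : List (List String)) : List (String × List (String × List (String × Int))) :=
  [("boja_po_tipu",
    ((PySem.List.slice lista_podataka (some 1) none).foldl
      (fun (d : PySem.Dict String (PySem.Dict String Int)) red =>
        let boja := PySem.List.pyGetD red 1 ""
        let tip := PySem.List.pyGetD red 2 ""
        let unutra := d.getD tip PySem.Dict.empty
        d.insert tip (unutra.insert boja (unutra.getD boja 0 + 1)))
      PySem.Dict.empty).items.map (fun q => (q.1, q.2.items)))]

-- ===== PRECONDITION & SPEC =====
-- Pre_ excludes exactly the inputs on which the Python A raises IndexError: a data row (after the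
-- header row) with fewer than 3 entries.
def Pre_boja_po_tipu (lista_podataka : List (List String)) : Prop :=
  ∀ red ∈ lista_podataka.drop 1, 3 ≤ red.length
instance (lista_podataka : List (List String)) : Decidable (Pre_boja_po_tipu lista_podataka) := by unfold Pre_boja_po_tipu; infer_instance
def pvWitness_boja_po_tipu : List (List String) :=
  [["id", "boja", "tip"], ["1", "crvena", "limuzina"], ["2", "plava", "limuzina"], ["3", "crvena", "karavan"]]
def Spec_boja_po_tipu (lista_podataka : List (List String)) (out : List (String × List (String × List (String × Int)))) : Prop := out = boja_po_tipu_alt lista_podataka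
instance (lista_podataka : List (List String)) (out : List (String × List (String × List (String × Int)))) : Decidable (Spec_boja_po_tipu lista_podataka out) := by unfold Spec_boja_po_tipu; infer_instance

-- ===== CLAIM (what is proved, stated in full; the proofs are below) =====
def Claim_equal_boja_po_tipu : Prop := ∀ (lista_podataka : List (List String)), Dom_boja_po_tipu lista_podataka → Pre_boja_po_tipu lista_podataka → Spec_boja_po_tipu lista_podataka (boja_po_tipu lista_podataka)

-- ===== LEMMAS AND PROOFS =====

-- the color and the type of a row
def pvCol (red : List String) : String := PySem.List.pyGetD red 1 ""
def pvTyp (red : List String) : String := PySem.List.pyGetD red 2 ""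

-- the colors of the rows of a given type, in row order
def pvCols (rows : List (List String)) (ty : String) : List String :=
  ((rows.map (fun r => (pvTyp r, pvCol r))).filter (fun p => ty == p.1)).map (·.2)

-- the value both programs compute: types in first-appearance order, each with the counter of its colors
def pvCanon (rows : List (List String)) : List (String × PySem.Dict String Int) :=
  (PySem.Set.ofList (rows.map pvTyp)).map (fun ty => (ty, PySem.Dict.counter (pvCols rows ty)))

theorem pv_insert_insert_same {κ ν : Type} [BEq κ] [LawfulBEq κ] (d : PySem.Dict κ ν) (k : κ) (v w : ν) :
    (d.insert k v).insert k w = d.insert k w := by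
  apply PySem.Dict.ext
  rcases hc : d.contains k with hf | ht
  · rw [PySem.Dict.items_insert_of_contains _ w (PySem.Dict.contains_insert_self d k v),
      PySem.Dict.items_insert_of_not_contains _ v hc,
      PySem.Dict.items_insert_of_not_contains _ w hc]
    simp [PySem.Dict.contains] at hc
    rw [List.map_append]
    congr 1
    · conv_rhs => rw [← List.map_id d.items]
      apply List.map_congr_left
      intro p hp
      simp [hc p.1 p.2 hp]
    · simp
  · rw [PySem.Dict.items_insert_of_contains _ w (PySem.Dict.contains_insert_self d k v),
      PySem.Dict.items_insert_of_contains _ v hc,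
      PySem.Dict.items_insert_of_contains _ w hc, List.map_map]
    apply List.map_congr_left
    intro p _
    by_cases h : p.1 = k <;> simp [h]

-- a fold of inserts whose value depends only on the key keeps the distinct keys in
-- first-appearance order
theorem pv_foldl_insert_keyfun {κ ν : Type} [BEq κ] [LawfulBEq κ] (xs : List κ) (f : κ → ν) :
    (xs.foldl (fun d x => d.insert x (f x)) PySem.Dict.empty)
      = PySem.Dict.mk ((PySem.Set.ofList xs).map (fun x => (x, f x))) := by
  induction xs using List.reverseRecOn with
  | nil => rfl
  | append_singleton xs x ih =>
    rw [List.foldl_append, List.foldl_cons, List.foldl_nil, ih, PySem.Set.ofList_append_singleton]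
    apply PySem.Dict.ext
    by_cases hx : x ∈ PySem.Set.ofList xs
    · rw [PySem.Dict.items_insert_of_contains, PySem.Set.add_of_mem hx]
      · rw [List.map_map]
        apply List.map_congr_left
        intro y _
        by_cases h : y = x <;> simp [h]
      · rw [PySem.Dict.contains_mk]
        simp only [List.any_map, List.any_eq_true]
        exact ⟨x, hx, by simp⟩
    · rw [PySem.Dict.items_insert_of_not_contains, PySem.Set.add_of_not_mem hx]
      · simp
      · rw [PySem.Dict.contains_mk]
        simp only [List.any_map, List.any_eq_false]
        intro y hy
        simp only [Function.comp_def]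
        intro hb
        exact hx (beq_iff_eq.mp hb ▸ hy)

theorem pv_getD_mk_map {κ ν : Type} [BEq κ] [LawfulBEq κ] (S : List κ) (f : κ → ν) (k : κ)
    (hnd : S.Nodup) (hk : k ∈ S) (d0 : ν) :
    (PySem.Dict.mk (S.map (fun x => (x, f x)))).getD k d0 = f k := by
  apply PySem.Dict.getD_of_mem_items
  · exact List.mem_map_of_mem hk
  · rw [PySem.Dict.keys_mk, List.map_map]
    simpa [Function.comp_def] using hnd

theorem pv_counter_snoc {κ : Type} [BEq κ] (xs : List κ) (x : κ) :
    PySem.Dict.counter (xs ++ [x])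
      = (PySem.Dict.counter xs).insert x ((PySem.Dict.counter xs).getD x 0 + 1) := by
  rw [← PySem.Dict.foldl_insert_getD_add_one_eq_counter (xs ++ [x]), List.foldl_append,
    PySem.Dict.foldl_insert_getD_add_one_eq_counter]
  simp

-- fold over range(len(xs)) reading xs[j] and ys[j] is a fold over the zip
theorem pv_fold_range2 {α β : Type} (xs ys : List α) (hl : ys.length = xs.length)
    (dx dy : α) (f : β → α → α → β) (init : β) :
    (PySem.List.pyRange 0 (PySem.List.len xs)).foldl
      (fun acc j => f acc (PySem.List.pyGetD xs j dx) (PySem.List.pyGetD ys j dy)) init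
    = (xs.zip ys).foldl (fun acc p => f acc p.1 p.2) init := by
  show (PySem.List.pyRange 0 (xs.length : Int)).foldl _ init = _
  rw [PySem.List.pyRange_zero_natCast, List.foldl_map]
  have key : ∀ n, n ≤ xs.length →
      (List.range n).foldl (fun acc (k : Nat) => f acc (PySem.List.pyGetD xs (k : Int) dx) (PySem.List.pyGetD ys (k : Int) dy)) init
      = ((xs.zip ys).take n).foldl (fun acc p => f acc p.1 p.2) init := by
    intro n hn
    induction n with
    | zero => simp
    | succ m ih =>
      rw [List.range_succ, List.foldl_append, ih (Nat.le_of_succ_le hn), List.take_add_one]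
      have hm : m < xs.length := hn
      have hm' : m < ys.length := by omega
      have hz : m < (xs.zip ys).length := by simp [List.length_zip]; omega
      rw [List.foldl_append, List.getElem?_eq_getElem hz]
      simp [PySem.List.pyGetD_natCast, hm, hm', List.getElem_zip]
  have := key xs.length le_rfl
  rw [List.take_of_length_le (by simp [List.length_zip])] at this
  exact this

-- A's inner j-loop: it builds the filtered color list and inserts it under the fixed key
-- (each intermediate insert of the same key is overwritten by the next one)
theorem pv_innerA (zs : List (String × String)) (ti : String) (b0 : List String)
    (d : PySem.Dict String (List String)) (hne : zs ≠ []) :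
    (zs.foldl (fun (st : List String × PySem.Dict String (List String)) p =>
        let boja := if ti == p.1 then st.1 ++ [p.2] else st.1
        (boja, st.2.insert ti boja)) (b0, d))
    = (b0 ++ (zs.filter (fun p => ti == p.1)).map (·.2),
       d.insert ti (b0 ++ (zs.filter (fun p => ti == p.1)).map (·.2))) := by
  induction zs using List.reverseRecOn generalizing b0 d with
  | nil => exact absurd rfl hne
  | append_singleton zs p ih =>
    rcases eq_or_ne zs [] with rfl | hzs
    · simp only [List.nil_append, List.foldl_cons, List.foldl_nil, List.filter_cons,
        List.filter_nil]
      by_cases h : (ti == p.1) = true <;> simp [h]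
    · rw [List.foldl_append, ih _ _ hzs, List.foldl_cons, List.foldl_nil]
      simp only [List.filter_append, List.map_append, List.filter_cons, List.filter_nil]
      by_cases h : (ti == p.1) = true <;>
        simp [h, pv_insert_insert_same, List.append_assoc]

theorem pv_cols_snoc (rows : List (List String)) (r : List String) (ty : String) :
    pvCols (rows ++ [r]) ty
      = pvCols rows ty ++ (if ty == pvTyp r then [pvCol r] else []) := by
  simp only [pvCols, List.map_append, List.filter_append, List.map_append, List.map_cons,
    List.filter_cons, List.filter_nil, List.map_nil]
  by_cases h : (ty == pvTyp r) = true <;> simp [h]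

theorem pv_cols_nil_of_not_mem (rows : List (List String)) (ty : String)
    (h : ty ∉ rows.map pvTyp) : pvCols rows ty = [] := by
  simp only [pvCols, List.map_eq_nil_iff, List.filter_eq_nil_iff]
  intro p hp
  simp only [List.mem_map] at hp
  obtain ⟨r, hr, rfl⟩ := hp
  intro hb
  rw [beq_iff_eq] at hb
  exact h (hb ▸ List.mem_map_of_mem hr)

theorem pv_canon_snoc_mem (rows : List (List String)) (r : List String)
    (h : pvTyp r ∈ PySem.Set.ofList (rows.map pvTyp)) :
    pvCanon (rows ++ [r])
      = (pvCanon rows).map (fun p =>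
          if (p.1 == pvTyp r) = true then
            (pvTyp r, PySem.Dict.counter (pvCols rows (pvTyp r) ++ [pvCol r]))
          else p) := by
  unfold pvCanon
  rw [show (rows ++ [r]).map pvTyp = rows.map pvTyp ++ [pvTyp r] by simp,
    PySem.Set.ofList_append_singleton, PySem.Set.add_of_mem h, List.map_map]
  apply List.map_congr_left
  intro y _
  by_cases hy : y = pvTyp r
  · subst hy
    simp only [Function.comp_def, beq_self_eq_true]
    rw [pv_cols_snoc]
    simp
  · simp only [Function.comp_def, show (y == pvTyp r) = false from beq_eq_false_iff_ne.mpr hy,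
      Bool.false_eq_true, if_false, pv_cols_snoc, List.append_nil]

theorem pv_canon_snoc_not_mem (rows : List (List String)) (r : List String)
    (h : pvTyp r ∉ PySem.Set.ofList (rows.map pvTyp)) :
    pvCanon (rows ++ [r]) = pvCanon rows ++ [(pvTyp r, PySem.Dict.counter [pvCol r])] := by
  unfold pvCanon
  rw [show (rows ++ [r]).map pvTyp = rows.map pvTyp ++ [pvTyp r] by simp,
    PySem.Set.ofList_append_singleton, PySem.Set.add_of_not_mem h, List.map_append]
  congr 1
  · apply List.map_congr_left
    intro y hy
    have hyne : (y == pvTyp r) = false := by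
      refine beq_eq_false_iff_ne.mpr ?_
      rintro rfl; exact h hy
    simp [pv_cols_snoc, hyne]
  · have hnil : pvCols rows (pvTyp r) = [] :=
      pv_cols_nil_of_not_mem _ _ (by simpa [PySem.Set.mem_ofList] using h)
    simp [pv_cols_snoc, hnil]

theorem pv_counter_singleton (x : String) :
    PySem.Dict.counter [x]
      = PySem.Dict.empty.insert x (PySem.Dict.empty.getD x 0 + 1) := by
  simpa using pv_counter_snoc [] x

-- B's single pass computes the canonical dict
theorem pv_foldB (rows : List (List String)) :
    (rows.foldl (fun (d : PySem.Dict String (PySem.Dict String Int)) red =>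
        let boja := PySem.List.pyGetD red 1 ""
        let tip := PySem.List.pyGetD red 2 ""
        let unutra := d.getD tip PySem.Dict.empty
        d.insert tip (unutra.insert boja (unutra.getD boja 0 + 1)))
      PySem.Dict.empty)
    = PySem.Dict.mk (pvCanon rows) := by
  induction rows using List.reverseRecOn with
  | nil => rfl
  | append_singleton rows r ih =>
    rw [List.foldl_append, List.foldl_cons, List.foldl_nil, ih]
    show (PySem.Dict.mk (pvCanon rows)).insert (pvTyp r)
        (((PySem.Dict.mk (pvCanon rows)).getD (pvTyp r) PySem.Dict.empty).insert (pvCol r)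
          (((PySem.Dict.mk (pvCanon rows)).getD (pvTyp r) PySem.Dict.empty).getD (pvCol r) 0 + 1))
      = PySem.Dict.mk (pvCanon (rows ++ [r]))
    by_cases h : pvTyp r ∈ PySem.Set.ofList (rows.map pvTyp)
    · have hget : (PySem.Dict.mk (pvCanon rows)).getD (pvTyp r) PySem.Dict.empty
          = PySem.Dict.counter (pvCols rows (pvTyp r)) :=
        pv_getD_mk_map _ _ _ (PySem.Set.nodup_ofList _) h _
      have hcontains : (PySem.Dict.mk (pvCanon rows)).contains (pvTyp r) = true := by
        rw [PySem.Dict.contains_mk]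
        simp only [pvCanon, List.any_map, List.any_eq_true]
        exact ⟨pvTyp r, h, by simp⟩
      apply PySem.Dict.ext
      rw [PySem.Dict.items_insert_of_contains _ _ hcontains, hget, ← pv_counter_snoc]
      rw [show (PySem.Dict.mk (pvCanon (rows ++ [r]))).items = pvCanon (rows ++ [r]) from rfl,
        show (PySem.Dict.mk (pvCanon rows)).items = pvCanon rows from rfl,
        pv_canon_snoc_mem rows r h]
    · have hcontains : (PySem.Dict.mk (pvCanon rows)).contains (pvTyp r) = false := by
        rw [PySem.Dict.contains_mk]
        simp only [pvCanon, List.any_map, List.any_eq_false]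
        intro y hy
        simp only [Function.comp_def]
        intro hb
        exact h (beq_iff_eq.mp hb ▸ hy)
      have hget : (PySem.Dict.mk (pvCanon rows)).getD (pvTyp r) PySem.Dict.empty
          = PySem.Dict.empty := PySem.Dict.getD_of_not_contains _ _ hcontains
      apply PySem.Dict.ext
      rw [PySem.Dict.items_insert_of_not_contains _ _ hcontains, hget, ← pv_counter_singleton,
        show (PySem.Dict.mk (pvCanon (rows ++ [r]))).items = pvCanon (rows ++ [r]) from rfl,
        show (PySem.Dict.mk (pvCanon rows)).items = pvCanon rows from rfl,
        pv_canon_snoc_not_mem rows r h]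

-- A phase 1 collects the color and type columns of the data rows
theorem pvA_phase1_eq (L : List (List String)) :
    pvA_phase1 L = ((L.drop 1).map pvCol, (L.drop 1).map pvTyp) := by
  have h := PySem.List.foldl_pyRange_pyGetD L ([] : String |> fun _ => List String)
      (f := fun (st : List String × List String) row =>
        (st.1 ++ [PySem.List.pyGetD row 1 ""], st.2 ++ [PySem.List.pyGetD row 2 ""]))
      (init := (([], []) : List String × List String)) (a := 1) (by norm_num)
  refine h.trans ?_
  rw [PySem.List.foldl_prod_mk (f := fun acc row => acc ++ [PySem.List.pyGetD row 1 ""])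
    (g := fun acc row => acc ++ [PySem.List.pyGetD row 2 ""])]
  rw [PySem.List.foldl_append_singleton_eq_map, PySem.List.foldl_append_singleton_eq_map]
  rfl

-- A phase 2 groups the colors per type, keys in first-appearance order
theorem pvA_grouping_eq (rows : List (List String)) :
    pvA_grouping ((rows.map pvCol)) ((rows.map pvTyp))
      = PySem.Dict.mk ((PySem.Set.ofList (rows.map pvTyp)).map (fun ty => (ty, pvCols rows ty))) := by
  unfold pvA_grouping
  have houter := PySem.List.foldl_pyRange_pyGetD (rows.map pvTyp) ""
      (f := fun (d : PySem.Dict String (List String)) ti =>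
        ((PySem.List.pyRange 0 (PySem.List.len (rows.map pvTyp))).foldl
          (fun (st : List String × PySem.Dict String (List String)) j =>
            let boja := if ti == PySem.List.pyGetD (rows.map pvTyp) j "" then st.1 ++ [PySem.List.pyGetD (rows.map pvCol) j ""] else st.1
            (boja, st.2.insert ti boja)) ([], d)).2)
      (init := (PySem.Dict.empty : PySem.Dict String (List String))) (a := 0) le_rfl
  refine Eq.trans (by exact houter) ?_
  simp only [Int.toNat_zero, List.drop_zero]
  rw [PySem.List.foldl_congr_mem _ _ (fun d ti => d.insert ti (pvCols rows ti)) _ ?_]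
  · rw [pv_foldl_insert_keyfun]
  · intro d ti hti
    have hrows : rows ≠ [] := by
      rintro rfl; simp at hti
    have hl : (rows.map pvCol).length = (rows.map pvTyp).length := by simp
    have h2 := pv_fold_range2 (rows.map pvTyp) (rows.map pvCol) hl "" ""
        (f := fun (st : List String × PySem.Dict String (List String)) a b =>
          let boja := if ti == a then st.1 ++ [b] else st.1
          (boja, st.2.insert ti boja)) (init := (([], d) : List String × PySem.Dict String (List String)))
    have hne : ((rows.map pvTyp).zip (rows.map pvCol)) ≠ [] := by
      rw [List.zip_map']; simpa using hrows
    have h3 := h2.trans (pv_innerA ((rows.map pvTyp).zip (rows.map pvCol)) ti [] d hne)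
    have h4 := congrArg Prod.snd h3
    simp only [List.zip_map'] at h4
    refine h4.trans ?_
    simp [pvCols]

-- A's counting loops over a color list compute its counter
theorem pvA_recnik_eq (lb : List String) : pvA_recnik lb = PySem.Dict.counter lb := by
  unfold pvA_recnik
  have h := PySem.List.foldl_pyRange_pyGetD lb ""
      (f := fun (r : PySem.Dict String Int) ci =>
        r.insert ci ((PySem.List.pyRange 0 (PySem.List.len lb)).foldl
          (fun c j => if ci == PySem.List.pyGetD lb j "" then c + 1 else c) 0))
      (init := (PySem.Dict.empty : PySem.Dict String Int)) (a := 0) le_rfl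
  refine Eq.trans (by exact h) ?_
  simp only [Int.toNat_zero, List.drop_zero]
  rw [PySem.List.foldl_congr_mem _ _ (fun r ci => r.insert ci ((lb.count ci : Int))) _ ?_]
  · rw [pv_foldl_insert_keyfun]
    apply PySem.Dict.ext
    rw [PySem.Dict.items_counter]
  · intro r ci _
    congr 1
    have hc := PySem.List.foldl_pyRange_pyGetD lb ""
        (f := fun (c : Int) x => if ci == x then c + 1 else c) (init := (0 : Int)) (a := 0) le_rfl
    refine Eq.trans (by exact hc) ?_
    simp only [Int.toNat_zero, List.drop_zero]
    rw [PySem.List.foldl_congr_mem _ _ (fun c x => if x == ci then c + 1 else c) _ ?_]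
    · rw [PySem.List.foldl_beq_add_one]
      simp
    · intro c x _
      simp only [beq_iff_eq]
      by_cases h : ci = x <;> simp [h, eq_comm]

-- A phase 3 replaces each grouped color list by its counter
theorem pvA_counting_eq (rows : List (List String)) :
    pvA_counting (PySem.Dict.mk ((PySem.Set.ofList (rows.map pvTyp)).map (fun ty => (ty, pvCols rows ty))))
      = PySem.Dict.mk (pvCanon rows) := by
  unfold pvA_counting
  have hkeys : (PySem.Dict.mk ((PySem.Set.ofList (rows.map pvTyp)).map (fun ty => (ty, pvCols rows ty)))).keys
      = PySem.Set.ofList (rows.map pvTyp) := by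
    rw [PySem.Dict.keys_mk, List.map_map]
    simp [Function.comp_def]
  rw [hkeys]
  rw [PySem.List.foldl_congr_mem _ _
    (fun acc key => acc.insert key (PySem.Dict.counter (pvCols rows key))) _ ?_]
  · rw [pv_foldl_insert_keyfun,
      PySem.Set.ofList_eq_self_of_nodup _ (PySem.Set.nodup_ofList _)]
    rfl
  · intro acc key hkey
    rw [pv_getD_mk_map _ _ _ (PySem.Set.nodup_ofList _) hkey, pvA_recnik_eq]

theorem pv_portA (L : List (List String)) :
    boja_po_tipu L
      = [("boja_po_tipu", (PySem.Dict.mk (pvCanon (L.drop 1))).items.map (fun q => (q.1, q.2.items)))] := by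
  unfold boja_po_tipu
  rw [pvA_phase1_eq, pvA_grouping_eq, pvA_counting_eq]

theorem pv_portB (L : List (List String)) :
    boja_po_tipu_alt L
      = [("boja_po_tipu", (PySem.Dict.mk (pvCanon (L.drop 1))).items.map (fun q => (q.1, q.2.items)))] := by
  unfold boja_po_tipu_alt
  rw [PySem.List.slice_from L (by norm_num : (0:Int) ≤ 1), pv_foldB]
  rfl

-- ===== VERDICT (by name: the statement is the Claim_ definition above) =====
theorem boja_po_tipu_spec : Claim_equal_boja_po_tipu := by
  intro L _ _
  unfold Spec_boja_po_tipu
  rw [pv_portA, pv_portB]
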